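-- pv_equiv track=rewrite | github.com/GuilhermePiorno/Lab_de_Prog_de_Jogos | Game/EatThis/pacman_moves.py | valid
-- ===== SOURCE A (Python) =====
-- def valid(maze, moves, pacman_matrix_position):
--     i = pacman_matrix_position[0]
--     j = pacman_matrix_position[1]
--
--     for move in moves:
--         if move == "L":
--             j -= 1
--         elif move == "R":
--             j += 1
--         elif move == "U":
--             i -= 1
--         elif move == "D":
--             i += 1
--
--         if not((2 <= i <= 30) and (2 <= j <= 27)):
--             return False
--         elif(maze[i][j] != 0):
--             return False
--
--     return True
-- ===== SOURCE B (Python) =====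
-- def valid(maze, moves, pacman_matrix_position):
--     DELTAS = {"L": (0, -1), "R": (0, 1), "U": (-1, 0), "D": (1, 0)}
--     i, j = pacman_matrix_position
--     path = []
--     for m in moves:
--         di, dj = DELTAS.get(m, (0, 0))
--         i += di
--         j += dj
--         path.append((i, j))
--     return all(2 <= i <= 30 and 2 <= j <= 27 and maze[i][j] == 0
--                for i, j in path)
-- ===== Notes on version B (the rewrite author's own statement) =====
-- stated objective: alternative
-- what changed: A's single interleaved update-and-check loop with early returns becomes a generate-then-validate decomposition: a delta table maps each move to (di,dj), a first pass materializes the list of positions after each move, and a separate all(...) pass checks bounds and cell emptiness.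
-- outside the precondition, e.g. on valid([[], [], [0, 0, 5]], ['R', 'R'], (2, 1)): A returns False, B returns False
import Mathlib
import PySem

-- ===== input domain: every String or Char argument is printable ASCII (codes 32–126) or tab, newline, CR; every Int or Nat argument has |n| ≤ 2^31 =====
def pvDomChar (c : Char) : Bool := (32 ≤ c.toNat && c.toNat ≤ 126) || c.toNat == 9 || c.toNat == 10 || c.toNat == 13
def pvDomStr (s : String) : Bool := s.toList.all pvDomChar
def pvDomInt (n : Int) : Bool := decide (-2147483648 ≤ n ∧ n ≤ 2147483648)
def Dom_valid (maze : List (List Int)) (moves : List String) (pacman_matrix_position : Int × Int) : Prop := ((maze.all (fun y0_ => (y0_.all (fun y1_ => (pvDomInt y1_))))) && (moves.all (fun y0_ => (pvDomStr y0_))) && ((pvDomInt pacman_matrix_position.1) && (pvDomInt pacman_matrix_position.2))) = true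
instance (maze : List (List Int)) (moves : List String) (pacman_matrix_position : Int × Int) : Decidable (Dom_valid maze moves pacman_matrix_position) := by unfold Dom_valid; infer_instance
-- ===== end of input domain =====

-- B replaces A's interleaved update-and-check loop by generate-the-path-then-validate (same cost);
-- return-value equivalence only, neither version mutates its arguments.

-- cell lookup maze[i][j]; the 0 default is never used inside Pre_valid (indices are bounds-checked first)
def pvCell (maze : List (List Int)) (i j : Int) : Int :=
  (((PySem.List.pyGet? maze i).bind (fun row => PySem.List.pyGet? row j)).getD 0)

-- ===== PORT A =====
def validGo (maze : List (List Int)) : List String → Int → Int → Bool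
  | [], _, _ => true
  | move :: rest, i, j =>
    let ij :=
      if move == "L" then (i, j - 1)
      else if move == "R" then (i, j + 1)
      else if move == "U" then (i - 1, j)
      else if move == "D" then (i + 1, j)
      else (i, j)
    if ¬(2 ≤ ij.1 ∧ ij.1 ≤ 30 ∧ 2 ≤ ij.2 ∧ ij.2 ≤ 27) then false
    else if pvCell maze ij.1 ij.2 ≠ 0 then false
    else validGo maze rest ij.1 ij.2

def valid (maze : List (List Int)) (moves : List String) (pacman_matrix_position : Int × Int) : Bool :=
  validGo maze moves pacman_matrix_position.1 pacman_matrix_position.2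

-- ===== PORT B =====
def pvDeltas : PySem.Dict String (Int × Int) :=
  PySem.Dict.ofList [("L", (0, -1)), ("R", (0, 1)), ("U", (-1, 0)), ("D", (1, 0))]

def pvPath : List String → Int → Int → List (Int × Int)
  | [], _, _ => []
  | m :: rest, i, j =>
    let d := pvDeltas.getD m (0, 0)
    (i + d.1, j + d.2) :: pvPath rest (i + d.1) (j + d.2)

def valid_alt (maze : List (List Int)) (moves : List String) (pacman_matrix_position : Int × Int) : Bool :=
  (pvPath moves pacman_matrix_position.1 pacman_matrix_position.2).all
    (fun p => decide (2 ≤ p.1 ∧ p.1 ≤ 30 ∧ 2 ≤ p.2 ∧ p.2 ≤ 27) && (pvCell maze p.1 p.2 == 0))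

-- ===== PRECONDITION & SPEC =====
-- positions reached after each move (the cells A may index); independent description of the walk,
-- used only to state Pre_valid
def pvStep (m : String) (p : Int × Int) : Int × Int :=
  if m == "L" then (p.1, p.2 - 1)
  else if m == "R" then (p.1, p.2 + 1)
  else if m == "U" then (p.1 - 1, p.2)
  else if m == "D" then (p.1 + 1, p.2)
  else p

def pvVisited : List String → (Int × Int) → List (Int × Int)
  | [], _ => []
  | m :: rest, p => pvStep m p :: pvVisited rest (pvStep m p)

-- Pre_ excludes exactly the inputs whose walk reaches a cell inside the 2..30 × 2..27 board that the
-- maze does not contain: there A raises IndexError — except when an earlier step already failed a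
-- check, where A returns False before indexing and B returns the same False (slight narrowing, cited).
def Pre_valid (maze : List (List Int)) (moves : List String) (pacman_matrix_position : Int × Int) : Prop :=
  ∀ p ∈ pvVisited moves pacman_matrix_position,
    (2 ≤ p.1 ∧ p.1 ≤ 30 ∧ 2 ≤ p.2 ∧ p.2 ≤ 27) →
      ((PySem.List.pyGet? maze p.1).bind (fun row => PySem.List.pyGet? row p.2)).isSome = true
instance (maze : List (List Int)) (moves : List String) (pacman_matrix_position : Int × Int) : Decidable (Pre_valid maze moves pacman_matrix_position) := by unfold Pre_valid; infer_instance

def pvWitness_valid : List (List Int) × List String × (Int × Int) :=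
  (List.replicate 31 (List.replicate 28 0), ["R", "D", "x"], (5, 5))

def Spec_valid (maze : List (List Int)) (moves : List String) (pacman_matrix_position : Int × Int) (out : Bool) : Prop := out = valid_alt maze moves pacman_matrix_position
instance (maze : List (List Int)) (moves : List String) (pacman_matrix_position : Int × Int) (out : Bool) : Decidable (Spec_valid maze moves pacman_matrix_position out) := by unfold Spec_valid; infer_instance

-- ===== CLAIM (what is proved, stated in full; the proofs are below) =====
def Claim_equal_valid : Prop := ∀ (maze : List (List Int)) (moves : List String) (pacman_matrix_position : Int × Int), Dom_valid maze moves pacman_matrix_position → Pre_valid maze moves pacman_matrix_position → Spec_valid maze moves pacman_matrix_position (valid maze moves pacman_matrix_position)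

-- ===== LEMMAS AND PROOFS =====

-- A's elif chain computes the same step as B's delta-table lookup
theorem step_eq (m : String) (i j : Int) :
    (if m == "L" then (i, j - 1)
     else if m == "R" then (i, j + 1)
     else if m == "U" then (i - 1, j)
     else if m == "D" then (i + 1, j)
     else (i, j)) =
    (i + (pvDeltas.getD m (0, 0)).1, j + (pvDeltas.getD m (0, 0)).2) := by
  rcases eq_or_ne m "L" with h | hL
  · subst h
    have hd : pvDeltas.getD "L" (0, 0) = (0, -1) := by decide
    simp [hd, Prod.ext_iff]; omega
  rcases eq_or_ne m "R" with h | hR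
  · subst h
    have hd : pvDeltas.getD "R" (0, 0) = (0, 1) := by decide
    simp [hd]
  rcases eq_or_ne m "U" with h | hU
  · subst h
    have hd : pvDeltas.getD "U" (0, 0) = (-1, 0) := by decide
    simp [hd, Prod.ext_iff]; omega
  rcases eq_or_ne m "D" with h | hD
  · subst h
    have hd : pvDeltas.getD "D" (0, 0) = (1, 0) := by decide
    simp [hd]
  have hd : pvDeltas.getD m (0, 0) = (0, 0) := by
    have hmk : pvDeltas =
        PySem.Dict.mk [("L", (0, -1)), ("R", (0, 1)), ("U", (-1, 0)), ("D", (1, 0))] := by rfl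
    rw [hmk, PySem.Dict.getD_eq_get?_getD]
    simp [Ne.symm hL, Ne.symm hR, Ne.symm hU, Ne.symm hD,
      PySem.Dict.get?]
  simp [hL, hR, hU, hD, hd]

theorem go_eq_path (maze : List (List Int)) (moves : List String) (i j : Int) :
    validGo maze moves i j =
      (pvPath moves i j).all
        (fun p => decide (2 ≤ p.1 ∧ p.1 ≤ 30 ∧ 2 ≤ p.2 ∧ p.2 ≤ 27) && (pvCell maze p.1 p.2 == 0)) := by
  induction moves generalizing i j with
  | nil => simp [validGo, pvPath]
  | cons m rest ih =>
    rw [validGo, pvPath]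
    rw [step_eq m i j]
    set i' := i + (pvDeltas.getD m (0, 0)).1
    set j' := j + (pvDeltas.getD m (0, 0)).2
    by_cases hb : 2 ≤ i' ∧ i' ≤ 30 ∧ 2 ≤ j' ∧ j' ≤ 27
    · by_cases hc : pvCell maze i' j' = 0
      · simp [hb, hc, ih]
      · simp [hb, hc]
    · simp [hb]

-- ===== VERDICT (by name: the statement is the Claim_ definition above) =====
theorem valid_spec : Claim_equal_valid := by
  intro maze moves pos _ _
  unfold Spec_valid valid valid_alt
  exact go_eq_path maze moves pos.1 pos.2
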